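-- pv_equiv track=rewrite | github.com/LiyabonaMpapela/Python | Testing/gumatj.py | decimal_to_gumatj
-- ===== SOURCE A (Python) =====
-- def decimal_to_gumatj(a):#convert a decimal to gumatj
--     dec=a
--     gum=0
--     i=0
--     while dec!=0:
--         gum+=(dec%5)*(10**i)
--         dec=dec//5
--         i+=1
--     return gum
-- ===== SOURCE B (Python) =====
-- def decimal_to_gumatj(a):
--     # Most-significant-first: find the largest power of 5 not exceeding a,
--     # then peel digits top-down, recombining with Horner's rule (gum*10 + digit).
--     p = 1
--     while p * 5 <= a:
--         p *= 5
--     gum = 0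
--     rem = a
--     while p >= 1:
--         gum = gum * 10 + rem // p
--         rem %= p
--         p //= 5
--     return gum
-- ===== Notes on version B (the rewrite author's own statement) =====
-- stated objective: alternative
-- what changed: B replaces A's least-significant-first accumulation (dec%5 weighted by growing powers of 10) with a most-significant-first algorithm: it first finds the largest power of 5 not exceeding a, then peels digits top-down recombining them by Horner's rule gum = gum*10 + rem//p, so no power of 10 is ever computed.
import Mathlib
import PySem

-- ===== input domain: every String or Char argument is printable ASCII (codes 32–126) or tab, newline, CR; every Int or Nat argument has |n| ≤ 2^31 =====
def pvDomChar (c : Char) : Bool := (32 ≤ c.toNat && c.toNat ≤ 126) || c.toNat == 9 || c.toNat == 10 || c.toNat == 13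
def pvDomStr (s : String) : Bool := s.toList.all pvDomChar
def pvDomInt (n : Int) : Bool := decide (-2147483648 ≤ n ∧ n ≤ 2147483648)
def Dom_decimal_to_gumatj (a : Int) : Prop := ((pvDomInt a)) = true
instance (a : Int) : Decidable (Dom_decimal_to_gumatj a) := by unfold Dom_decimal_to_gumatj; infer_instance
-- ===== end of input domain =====

-- B rewrites A's least-significant-first digit accumulation (dec%5 weighted by 10^i) as a
-- most-significant-first Horner scheme: find the largest power of 5 ≤ a, then peel digits
-- top-down with gum = gum*10 + digit; alternative algorithm, same cost.


-- ===== PORT A =====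
-- A's while-loop; fuel only makes the recursion total (a.toNat + 1 steps always suffice for a ≥ 0).
def gumLoopA (fuel : Nat) (dec gum : Int) (i : Nat) : Int :=
  match fuel with
  | 0 => gum
  | f + 1 =>
    if dec ≠ 0 then
      gumLoopA f (PySem.Int.floordiv dec 5) (gum + PySem.Int.mod dec 5 * 10 ^ i) (i + 1)
    else gum

def decimal_to_gumatj (a : Int) : Int := gumLoopA (a.toNat + 1) a 0 0

-- ===== PORT B =====
-- first while-loop of B: p *= 5 while p*5 ≤ a (fuel for totality only)
def findP (fuel : Nat) (p a : Int) : Int :=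
  match fuel with
  | 0 => p
  | f + 1 => if p * 5 ≤ a then findP f (p * 5) a else p

-- second while-loop of B: Horner recombination gum = gum*10 + rem//p; rem %= p; p //= 5
def hornerB (fuel : Nat) (p rem gum : Int) : Int :=
  match fuel with
  | 0 => gum
  | f + 1 =>
    if 1 ≤ p then
      hornerB f (PySem.Int.floordiv p 5) (PySem.Int.mod rem p) (gum * 10 + PySem.Int.floordiv rem p)
    else gum

def decimal_to_gumatj_alt (a : Int) : Int :=
  hornerB (a.toNat + 2) (findP (a.toNat + 1) 1 a) a 0

-- ===== PRECONDITION & SPEC =====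
-- Pre_ excludes a < 0: there A's loop never terminates (dec//5 stalls at -1), so A returns on no negative input.
def Pre_decimal_to_gumatj (a : Int) : Prop := 0 ≤ a
instance (a : Int) : Decidable (Pre_decimal_to_gumatj a) := by unfold Pre_decimal_to_gumatj; infer_instance

def pvWitness_decimal_to_gumatj : Int := 6

def Spec_decimal_to_gumatj (a : Int) (out : Int) : Prop := out = decimal_to_gumatj_alt a
instance (a : Int) (out : Int) : Decidable (Spec_decimal_to_gumatj a out) := by unfold Spec_decimal_to_gumatj; infer_instance

-- ===== CLAIM (what is proved, stated in full; the proofs are below) =====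
def Claim_equal_decimal_to_gumatj : Prop := ∀ (a : Int), Dom_decimal_to_gumatj a → Pre_decimal_to_gumatj a → Spec_decimal_to_gumatj a (decimal_to_gumatj a)

-- ===== LEMMAS AND PROOFS =====

-- The mathematical value both programs compute: base-5 digits of n read as a decimal numeral.
def gum5 (n : Nat) : Int :=
  if h : n = 0 then 0 else gum5 (n / 5) * 10 + ((n % 5 : Nat) : Int)
decreasing_by exact Nat.div_lt_self (Nat.pos_of_ne_zero h) (by norm_num)

lemma gum5_zero : gum5 0 = 0 := by simp [gum5]

lemma gum5_eq (n : Nat) : gum5 n = gum5 (n / 5) * 10 + ((n % 5 : Nat) : Int) := by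
  by_cases h : n = 0
  · subst h; simp [gum5]
  · rw [gum5]; simp [h]

lemma gum5_small {n : Nat} (h : n < 5) : gum5 n = (n : Int) := by
  rw [gum5_eq n, Nat.div_eq_of_lt h, Nat.mod_eq_of_lt h, gum5_zero]; simp

lemma fdiv5 (n : Nat) : PySem.Int.floordiv (n : Int) 5 = ((n / 5 : Nat) : Int) := by
  exact_mod_cast PySem.Int.floordiv_natCast n 5

lemma mod5 (n : Nat) : PySem.Int.mod (n : Int) 5 = ((n % 5 : Nat) : Int) := by
  exact_mod_cast PySem.Int.mod_natCast n 5

-- A's loop computes gum + gum5 dec * 10^i (for nonnegative dec, with enough fuel).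
lemma gumLoopA_eq (fuel : Nat) : ∀ (n : Nat) (gum : Int) (i : Nat), n < fuel →
    gumLoopA fuel (n : Int) gum i = gum + gum5 n * 10 ^ i := by
  induction fuel with
  | zero => intro n gum i h; omega
  | succ f ih =>
    intro n gum i h
    by_cases hn : n = 0
    · subst hn; simp [gumLoopA, gum5_zero]
    · have hcast : ((n : Int) ≠ 0) := by exact_mod_cast hn
      simp only [gumLoopA, hcast, ne_eq, not_false_iff, if_true]
      rw [fdiv5, mod5,
        ih (n / 5) _ (i + 1) (by
          have := Nat.div_lt_self (Nat.pos_of_ne_zero hn) (by norm_num : 1 < 5); omega)]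
      rw [gum5_eq n]; ring

-- Splitting off the top base-5 digit of n (j low digits remain) splits the decimal numeral.
lemma gum5_split (j : Nat) : ∀ (n : Nat), n < 5 ^ (j + 1) →
    gum5 n = ((n / 5 ^ j : Nat) : Int) * 10 ^ j + gum5 (n % 5 ^ j) := by
  induction j with
  | zero =>
    intro n h
    have h5 : n < 5 := by simpa using h
    simp [gum5_small h5, Nat.mod_one, gum5_zero]
  | succ j ih =>
    intro n h
    have hdiv : n / 5 < 5 ^ (j + 1) := by
      apply Nat.div_lt_of_lt_mul
      calc n < 5 ^ (j + 1 + 1) := h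
        _ = 5 * 5 ^ (j + 1) := by ring
    have ihd := ih (n / 5) hdiv
    have hdd : n / 5 / 5 ^ j = n / 5 ^ (j + 1) := by
      rw [Nat.div_div_eq_div_mul]; congr 1; ring
    set m := n % 5 ^ (j + 1) with hm
    have hmdiv : m / 5 = n / 5 % 5 ^ j := by
      rw [hm]
      have h51 : (5 : Nat) ^ (j + 1) = 5 * 5 ^ j := by ring
      rw [h51, Nat.mod_mul_right_div_self]
    have hmmod : m % 5 = n % 5 := by
      rw [hm]; exact Nat.mod_mod_of_dvd n ⟨5 ^ j, by ring⟩
    have hlow : gum5 m = gum5 (n / 5 % 5 ^ j) * 10 + ((n % 5 : Nat) : Int) := by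
      rw [gum5_eq m, hmdiv, hmmod]
    rw [gum5_eq n, ihd, hdd, hlow]
    push_cast
    ring

-- B's Horner loop with p = 0 returns gum immediately.
lemma hornerB_stop (fuel : Nat) (gum : Int) (rem : Int) : hornerB fuel 0 rem gum = gum := by
  cases fuel <;> simp [hornerB]

-- B's Horner loop, run with p = 5^j and 0 ≤ rem < 5^(j+1), produces gum·10^(j+1) + gum5 rem.
lemma hornerB_eq (j : Nat) : ∀ (fuel : Nat) (n : Nat) (gum : Int), j < fuel → n < 5 ^ (j + 1) →
    hornerB fuel ((5 ^ j : Nat) : Int) (n : Int) gum = gum * 10 ^ (j + 1) + gum5 n := by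
  induction j with
  | zero =>
    intro fuel n gum hf hn
    obtain ⟨f, rfl⟩ : ∃ f, fuel = f + 1 := ⟨fuel - 1, by omega⟩
    simp only [hornerB, pow_zero, Nat.cast_one]
    rw [if_pos (by norm_num : (1:Int) ≤ 1)]
    have e1 : PySem.Int.floordiv (1 : Int) 5 = 0 := by decide
    have e2 : PySem.Int.mod ((n : Int)) 1 = 0 := by
      have := PySem.Int.mod_natCast n 1; simpa using this
    have e3 : PySem.Int.floordiv ((n : Int)) 1 = (n : Int) := by
      have := PySem.Int.floordiv_natCast n 1; simpa using this
    rw [e1, e2, e3, hornerB_stop]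
    have h5 : n < 5 := by simpa using hn
    rw [gum5_small h5]; ring
  | succ j ih =>
    intro fuel n gum hf hn
    obtain ⟨f, rfl⟩ : ∃ f, fuel = f + 1 := ⟨fuel - 1, by omega⟩
    have hp1 : (1 : Int) ≤ ((5 ^ (j + 1) : Nat) : Int) := by
      exact_mod_cast Nat.one_le_iff_ne_zero.mpr (by positivity)
    simp only [hornerB]
    rw [if_pos hp1]
    have hq : (5 : Nat) ^ (j + 1) / 5 = 5 ^ j := by
      rw [pow_succ]; omega
    have e1 : PySem.Int.floordiv ((5 ^ (j + 1) : Nat) : Int) 5 = ((5 ^ j : Nat) : Int) := by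
      have h := fdiv5 (5 ^ (j + 1)); rw [hq] at h; exact h
    have e2 : PySem.Int.mod ((n : Int)) ((5 ^ (j + 1) : Nat) : Int) = ((n % 5 ^ (j + 1) : Nat) : Int) :=
      PySem.Int.mod_natCast n _
    have e3 : PySem.Int.floordiv ((n : Int)) ((5 ^ (j + 1) : Nat) : Int) = ((n / 5 ^ (j + 1) : Nat) : Int) :=
      PySem.Int.floordiv_natCast n _
    rw [e1, e2, e3]
    have hmod : n % 5 ^ (j + 1) < 5 ^ (j + 1) := Nat.mod_lt _ (by positivity)
    rw [ih f (n % 5 ^ (j + 1)) _ (by omega) hmod]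
    rw [gum5_split (j + 1) n hn]
    ring

-- findP returns a power of 5 whose next power exceeds a; the exponent is at most the fuel spent.
lemma findP_spec (fuel : Nat) : ∀ (m : Nat) (a : Int), a < ((5 ^ m * 5 ^ fuel : Nat) : Int) →
    ∃ j : Nat, findP fuel ((5 ^ m : Nat) : Int) a = ((5 ^ j : Nat) : Int) ∧
      a < ((5 ^ (j + 1) : Nat) : Int) ∧ j ≤ m + fuel := by
  induction fuel with
  | zero =>
    intro m a h
    refine ⟨m, rfl, ?_, by omega⟩
    simp only [pow_zero, Nat.mul_one] at h
    calc a < ((5 ^ m : Nat) : Int) := h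
      _ ≤ ((5 ^ (m + 1) : Nat) : Int) := by
          exact_mod_cast Nat.pow_le_pow_right (by norm_num) (by omega)
  | succ f ih =>
    intro m a h
    have hstep : ((5 ^ m : Nat) : Int) * 5 = ((5 ^ (m + 1) : Nat) : Int) := by push_cast; ring
    by_cases hc : ((5 ^ m : Nat) : Int) * 5 ≤ a
    · simp only [findP]
      rw [if_pos hc, hstep]
      obtain ⟨j, h1, h2, h3⟩ := ih (m + 1) a (by
        calc a < ((5 ^ m * 5 ^ (f + 1) : Nat) : Int) := h
          _ = ((5 ^ (m + 1) * 5 ^ f : Nat) : Int) := by congr 1; ring)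
      exact ⟨j, h1, h2, by omega⟩
    · simp only [findP]
      rw [if_neg hc]
      refine ⟨m, rfl, ?_, by omega⟩
      calc a < ((5 ^ m : Nat) : Int) * 5 := lt_of_not_ge hc
        _ = ((5 ^ (m + 1) : Nat) : Int) := hstep

lemma nat_lt_pow5 (n : Nat) : n < 5 ^ n := Nat.lt_pow_self (by norm_num)

-- ===== VERDICT (by name: the statement is the Claim_ definition above) =====
theorem decimal_to_gumatj_spec : Claim_equal_decimal_to_gumatj := by
  intro a _ hpre
  unfold Spec_decimal_to_gumatj decimal_to_gumatj decimal_to_gumatj_alt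
  obtain ⟨n, rfl⟩ : ∃ n : Nat, a = (n : Int) := ⟨a.toNat, (Int.toNat_of_nonneg hpre).symm⟩
  rw [Int.toNat_natCast]
  -- A's side
  rw [gumLoopA_eq (n + 1) n 0 0 (by omega)]
  -- B's side
  have hbound : (n : Int) < ((5 ^ 0 * 5 ^ (n + 1) : Nat) : Int) := by
    have := nat_lt_pow5 n
    have h2 : (5:Nat) ^ n ≤ 5 ^ (n+1) := Nat.pow_le_pow_right (by norm_num) (by omega)
    exact_mod_cast by omega
  obtain ⟨j, hfind, hlt, hj⟩ := findP_spec (n + 1) 0 (n : Int) hbound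
  have hjlt : j < n + 2 := by omega
  have hn5 : n < 5 ^ (j + 1) := by exact_mod_cast hlt
  have hfind1 : findP (n + 1) 1 (n : Int) = ((5 ^ j : Nat) : Int) := by
    simpa using hfind
  rw [hfind1, hornerB_eq j (n + 2) n 0 hjlt hn5]
  simp
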